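-- pv_equiv track=rewrite | github.com/powerof3/MainMenuVideo | parse_commonlib_types.py | _type_str_size
-- ===== SOURCE A (Python) =====
-- def _type_str_size(type_str):
--     """Estimate byte size from our type string."""
--     sizes = {
--         'bool': 1, 'i8': 1, 'u8': 1,
--         'i16': 2, 'u16': 2,
--         'i32': 4, 'u32': 4, 'f32': 4,
--         'i64': 8, 'u64': 8, 'f64': 8,
--         'ptr': 8, 'void': 0,
--     }
--     if type_str in sizes:
--         return sizes[type_str]
--     if type_str.startswith('bytes:'):
--         return int(type_str[6:])
--     if type_str.startswith('arr:'):
--         # arr:ELEM:COUNT — count is always the last colon-terminated integer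
--         rest = type_str[4:]
--         last = rest.rfind(':')
--         if last >= 0 and rest[last+1:].isdigit():
--             count = int(rest[last+1:])
--             elem_size = _type_str_size(rest[:last])
--             return elem_size * count
--         return 0
--     if type_str.startswith('enum:'):
--         return 4  # default enum size
--     if type_str.startswith('struct:'):
--         return 8  # unknown, assume pointer-sized
--     return 0
-- ===== SOURCE B (Python) =====
-- def _type_str_size(type_str):
--     """Estimate byte size from our type string."""
--     sizes = {
--         'bool': 1, 'i8': 1, 'u8': 1,
--         'i16': 2, 'u16': 2,
--         'i32': 4, 'u32': 4, 'f32': 4,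
--         'i64': 8, 'u64': 8, 'f64': 8,
--         'ptr': 8, 'void': 0,
--     }
--     # Iteratively peel arr:ELEM:COUNT layers, accumulating the product of counts,
--     # then size the remaining base element once.
--     count = 1
--     s = type_str
--     while s.startswith('arr:'):
--         rest = s[4:]
--         last = rest.rfind(':')
--         if last < 0 or not rest[last + 1:].isdigit():
--             return 0
--         count *= int(rest[last + 1:])
--         s = rest[:last]
--     if s in sizes:
--         return sizes[s] * count
--     if s.startswith('bytes:'):
--         return int(s[6:]) * count
--     if s.startswith('enum:'):
--         return 4 * count
--     if s.startswith('struct:'):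
--         return 8 * count
--     return 0
-- ===== Notes on version B (the rewrite author's own statement) =====
-- stated objective: alternative
-- what changed: The recursive arr: branch is replaced by an iterative peel loop that accumulates the product of the array counts and sizes the base element once at the end.
import Mathlib
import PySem

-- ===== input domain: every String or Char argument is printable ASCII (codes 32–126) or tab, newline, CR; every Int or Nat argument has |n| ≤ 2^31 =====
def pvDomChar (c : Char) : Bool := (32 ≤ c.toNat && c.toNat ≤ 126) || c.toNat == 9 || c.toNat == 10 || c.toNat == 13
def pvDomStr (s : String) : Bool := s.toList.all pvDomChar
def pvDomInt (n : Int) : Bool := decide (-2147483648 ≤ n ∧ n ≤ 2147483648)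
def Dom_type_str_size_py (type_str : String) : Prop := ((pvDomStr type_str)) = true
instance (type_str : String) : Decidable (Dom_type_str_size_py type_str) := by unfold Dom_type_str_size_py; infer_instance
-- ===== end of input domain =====

-- B replaces A's recursive arr: branch by an iterative peel loop accumulating the product of counts; equivalence is on the return value.

-- ===== PORT A =====
-- the `sizes` dict (shared literal data of both Pythons)
def pvSizes : PySem.Dict (List Char) Int :=
  PySem.Dict.ofList [("bool".toList, 1), ("i8".toList, 1), ("u8".toList, 1),
    ("i16".toList, 2), ("u16".toList, 2),
    ("i32".toList, 4), ("u32".toList, 4), ("f32".toList, 4),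
    ("i64".toList, 8), ("u64".toList, 8), ("f64".toList, 8),
    ("ptr".toList, 8), ("void".toList, 0)]

-- A's recursion, made structural with fuel > length of the string (each arr: peel strictly shrinks the string, so the fuel is never exhausted)
def pvGoA : Nat → List Char → Int
  | 0, _ => 0
  | fuel + 1, s =>
    match pvSizes.get? s with
    | some v => v
    | none =>
      if PySem.Chars.startswith s "bytes:".toList then
        (PySem.Int.ofChars? (PySem.List.slice s (some 6) none)).getD 0
      else if PySem.Chars.startswith s "arr:".toList then
        let rest := PySem.List.slice s (some 4) none
        let last := PySem.Chars.rfind rest [':']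
        if 0 ≤ last ∧ PySem.Chars.strIsdigit (PySem.List.slice rest (some (last + 1)) none) = true then
          let count := (PySem.Int.ofChars? (PySem.List.slice rest (some (last + 1)) none)).getD 0
          pvGoA fuel (PySem.List.slice rest none (some last)) * count
        else 0
      else if PySem.Chars.startswith s "enum:".toList then 4
      else if PySem.Chars.startswith s "struct:".toList then 8
      else 0

def type_str_size_py (type_str : String) : Int :=
  pvGoA (type_str.toList.length + 1) type_str.toList

-- ===== PORT B =====
-- B's code after the while loop: size of the base element
def pvBase (s : List Char) : Int :=
  match pvSizes.get? s with
  | some v => v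
  | none =>
    if PySem.Chars.startswith s "bytes:".toList then
      (PySem.Int.ofChars? (PySem.List.slice s (some 6) none)).getD 0
    else if PySem.Chars.startswith s "enum:".toList then 4
    else if PySem.Chars.startswith s "struct:".toList then 8
    else 0

-- B's while loop: peel arr: layers, accumulating the count product (same fuel discipline as pvGoA)
def pvGoB : Nat → List Char → Int → Int
  | 0, _, _ => 0
  | fuel + 1, s, count =>
    if PySem.Chars.startswith s "arr:".toList then
      let rest := PySem.List.slice s (some 4) none
      let last := PySem.Chars.rfind rest [':']
      if 0 ≤ last ∧ PySem.Chars.strIsdigit (PySem.List.slice rest (some (last + 1)) none) = true then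
        pvGoB fuel (PySem.List.slice rest none (some last))
          (count * (PySem.Int.ofChars? (PySem.List.slice rest (some (last + 1)) none)).getD 0)
      else 0
    else pvBase s * count

def type_str_size_py_alt (type_str : String) : Int :=
  pvGoB (type_str.toList.length + 1) type_str.toList 1

-- ===== PRECONDITION & SPEC =====
-- Pre_ excludes exactly the inputs where A (and B alike) raises ValueError: a bytes: payload,
-- possibly nested under arr: layers, that int() cannot parse.  It tracks only the control flow
-- reaching the int() call, never the computed sizes.
def pvNoRaise : Nat → List Char → Bool
  | 0, _ => true
  | fuel + 1, s =>
    if pvSizes.contains s then true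
    else if PySem.Chars.startswith s "bytes:".toList then
      (PySem.Int.ofChars? (PySem.List.slice s (some 6) none)).isSome
    else if PySem.Chars.startswith s "arr:".toList then
      let rest := PySem.List.slice s (some 4) none
      let last := PySem.Chars.rfind rest [':']
      if 0 ≤ last ∧ PySem.Chars.strIsdigit (PySem.List.slice rest (some (last + 1)) none) = true then
        pvNoRaise fuel (PySem.List.slice rest none (some last))
      else true
    else true

def Pre_type_str_size_py (type_str : String) : Prop :=
  pvNoRaise (type_str.toList.length + 1) type_str.toList = true
instance (type_str : String) : Decidable (Pre_type_str_size_py type_str) := by unfold Pre_type_str_size_py; infer_instance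

def pvWitness_type_str_size_py : String := "arr:bytes:8:2"

def Spec_type_str_size_py (type_str : String) (out : Int) : Prop := out = type_str_size_py_alt type_str
instance (type_str : String) (out : Int) : Decidable (Spec_type_str_size_py type_str out) := by unfold Spec_type_str_size_py; infer_instance

-- ===== CLAIM (what is proved, stated in full; the proofs are below) =====
def Claim_equal_type_str_size_py : Prop := ∀ (type_str : String), Dom_type_str_size_py type_str → Pre_type_str_size_py type_str → Spec_type_str_size_py type_str (type_str_size_py type_str)

-- ===== LEMMAS AND PROOFS =====

lemma pv_arr_shape (s : List Char) (h : PySem.Chars.startswith s "arr:".toList = true) :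
    ∃ t, s = 'a' :: 'r' :: 'r' :: ':' :: t := by
  obtain ⟨t, ht⟩ := (PySem.Chars.startswith_iff s "arr:".toList).mp h
  exact ⟨t, ht.symm⟩

lemma pv_arr_get_none (s : List Char) (h : PySem.Chars.startswith s "arr:".toList = true) :
    pvSizes.get? s = none := by
  obtain ⟨t, rfl⟩ := pv_arr_shape s h
  simp [pvSizes, PySem.Dict.ofList, PySem.Dict.get?, PySem.Dict.update, PySem.Dict.insert,
    PySem.Dict.empty, PySem.Dict.contains]

lemma pv_arr_not_bytes (s : List Char) (h : PySem.Chars.startswith s "arr:".toList = true) :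
    PySem.Chars.startswith s "bytes:".toList = false := by
  obtain ⟨t, rfl⟩ := pv_arr_shape s h
  simp [PySem.Chars.startswith, List.isPrefixOf]

lemma pv_inner_lt (s : List Char) (h : PySem.Chars.startswith s "arr:".toList = true)
    (last : Int) (hl : 0 ≤ last) :
    (PySem.List.slice (PySem.List.slice s (some 4) none) none (some last)).length < s.length := by
  obtain ⟨t, rfl⟩ := pv_arr_shape s h
  simp only [PySem.List.slice_to _ hl, PySem.List.slice_from _ (by norm_num : (0:Int) ≤ 4)]
  simp
  omega

lemma pv_base_eq (s : List Char) (fuel : Nat) (h : PySem.Chars.startswith s "arr:".toList = false) :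
    pvGoA (fuel + 1) s = pvBase s := by
  have h' : PySem.Chars.startswith s ['a', 'r', 'r', ':'] = false := by simpa using h
  cases hg : pvSizes.get? s with
  | some v => simp [pvGoA, pvBase, hg]
  | none => simp [pvGoA, pvBase, hg, h']

lemma pv_main (fuel : Nat) : ∀ (s : List Char) (count : Int), s.length < fuel →
    pvNoRaise fuel s = true → pvGoB fuel s count = pvGoA fuel s * count := by
  induction fuel with
  | zero => intro s count hlen _; omega
  | succ n ih =>
    intro s count hlen hnr
    by_cases harr : PySem.Chars.startswith s "arr:".toList = true
    · have hget := pv_arr_get_none s harr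
      have hbytes := pv_arr_not_bytes s harr
      have hcont : pvSizes.contains s = false := by
        rw [PySem.Dict.contains_eq_isSome_get?, hget]; rfl
      simp only [pvGoA, pvGoB, pvNoRaise, hget, hbytes, harr, hcont, Bool.false_eq_true,
        if_false, if_true] at hnr ⊢
      by_cases hc : 0 ≤ PySem.Chars.rfind (PySem.List.slice s (some 4) none) [':'] ∧
          PySem.Chars.strIsdigit (PySem.List.slice (PySem.List.slice s (some 4) none)
            (some (PySem.Chars.rfind (PySem.List.slice s (some 4) none) [':'] + 1)) none) = true
      · rw [if_pos hc] at hnr ⊢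
        rw [if_pos hc]
        have hlt : (PySem.List.slice (PySem.List.slice s (some 4) none) none
            (some (PySem.Chars.rfind (PySem.List.slice s (some 4) none) [':']))).length < n :=
          lt_of_lt_of_le (pv_inner_lt s harr _ hc.1) (by omega)
        rw [ih _ _ hlt hnr]
        ring
      · rw [if_neg hc]
        rw [if_neg hc]
        ring
    · have hf : PySem.Chars.startswith s "arr:".toList = false := by
        simpa using harr
      simp only [pvGoB, hf, Bool.false_eq_true, if_false]
      rw [pv_base_eq s n hf]

-- ===== VERDICT (by name: the statement is the Claim_ definition above) =====
theorem type_str_size_py_spec : Claim_equal_type_str_size_py := by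
  intro s _ hpre
  unfold Spec_type_str_size_py type_str_size_py type_str_size_py_alt
  rw [pv_main (s.toList.length + 1) s.toList 1 (by omega) hpre, mul_one]
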